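-- pv_equiv track=rewrite | github.com/cscitutorials/Data-Structures-and-Algorithms-in-Python | Searching_an_array/Linear Search/Finding Max value/max diff btw groups of size 2.py | max_diff_btw_groups_of_size_two
-- ===== SOURCE A (Python) =====
-- def max_diff_btw_groups_of_size_two(arr):
--     highest_num = -1000000
--     second_high = -1000000
--     lowest_num = 1000000
--     second_low = 1000000
--     for i in range(len(arr)):
--         if arr[i] > highest_num:
--             second_high = highest_num
--             highest_num = arr[i]
--         if arr[i] > second_high and arr[i] != highest_num:
--             second_high = arr[i]
--         if arr[i] < lowest_num:
--             second_low = lowest_num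
--             lowest_num = arr[i]
--         if arr[i] < second_low and arr[i] != lowest_num:
--             second_low = arr[i]
--     return abs(highest_num + second_high) - abs(lowest_num + second_low)
-- ===== SOURCE B (Python) =====
-- def max_diff_btw_groups_of_size_two(arr):
--     H = max([*arr, -1000000])
--     L = min([*arr, 1000000])
--     second_high = max([x for x in arr if x != H] + [-1000000])
--     second_low = min([x for x in arr if x != L] + [1000000])
--     return abs(H + second_high) - abs(L + second_low)
-- ===== Notes on version B (the rewrite author's own statement) =====
-- stated objective: simpler
-- what changed: A's single interleaved loop tracking four variables (highest, second-highest, lowest, second-lowest with sentinel floors) is replaced by built-in max/min reductions: the extremes over the sentinel-padded array, and the seconds over the array filtered of the chosen extreme, padded with the sentinel.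
import Mathlib
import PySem

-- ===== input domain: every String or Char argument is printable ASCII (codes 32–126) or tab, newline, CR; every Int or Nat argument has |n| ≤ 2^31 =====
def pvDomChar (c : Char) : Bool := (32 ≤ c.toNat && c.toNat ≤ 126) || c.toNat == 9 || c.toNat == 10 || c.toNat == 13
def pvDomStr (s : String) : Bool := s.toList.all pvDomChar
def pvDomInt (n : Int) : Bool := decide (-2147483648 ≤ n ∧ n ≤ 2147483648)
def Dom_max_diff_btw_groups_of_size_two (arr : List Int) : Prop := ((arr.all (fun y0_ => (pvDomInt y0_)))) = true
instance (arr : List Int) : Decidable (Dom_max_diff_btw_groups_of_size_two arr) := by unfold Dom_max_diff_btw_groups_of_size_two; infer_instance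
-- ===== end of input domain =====

-- B replaces A's single interleaved four-variable tracking loop with built-in max/min
-- reductions over sentinel-padded and filtered copies of the array (objective: simpler).

-- ===== PORT A =====
-- loop body of A, acting on the state (highest_num, second_high, lowest_num, second_low)
def mdStep (st : Int × Int × Int × Int) (x : Int) : Int × Int × Int × Int :=
  let h := st.1
  let sh := st.2.1
  let l := st.2.2.1
  let sl := st.2.2.2
  let p1 : Int × Int := if x > h then (x, h) else (h, sh)
  let h := p1.1
  let sh := p1.2
  let sh := if x > sh ∧ x ≠ h then x else sh
  let p2 : Int × Int := if x < l then (x, l) else (l, sl)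
  let l := p2.1
  let sl := p2.2
  let sl := if x < sl ∧ x ≠ l then x else sl
  (h, sh, l, sl)

def max_diff_btw_groups_of_size_two (arr : List Int) : Int :=
  let st := arr.foldl mdStep (-1000000, -1000000, 1000000, 1000000)
  |st.1 + st.2.1| - |st.2.2.1 + st.2.2.2|

-- ===== PORT B =====
def max_diff_btw_groups_of_size_two_alt (arr : List Int) : Int :=
  let H := arr.foldl max (-1000000)
  let L := arr.foldl min 1000000
  let second_high := (arr.filter (fun x => x ≠ H)).foldl max (-1000000)
  let second_low := (arr.filter (fun x => x ≠ L)).foldl min 1000000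
  |H + second_high| - |L + second_low|

-- ===== PRECONDITION & SPEC =====
def Spec_max_diff_btw_groups_of_size_two (arr : List Int) (out : Int) : Prop := out = max_diff_btw_groups_of_size_two_alt arr
instance (arr : List Int) (out : Int) : Decidable (Spec_max_diff_btw_groups_of_size_two arr out) := by unfold Spec_max_diff_btw_groups_of_size_two; infer_instance

-- ===== CLAIM (what is proved, stated in full; the proofs are below) =====
def Claim_equal_max_diff_btw_groups_of_size_two : Prop := ∀ (arr : List Int), Dom_max_diff_btw_groups_of_size_two arr → Spec_max_diff_btw_groups_of_size_two arr (max_diff_btw_groups_of_size_two arr)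

-- ===== LEMMAS AND PROOFS =====

theorem init_le_foldl_max (l : List Int) (c : Int) : c ≤ l.foldl max c := by
  induction l generalizing c with
  | nil => simp
  | cons a t ih => exact le_trans (le_max_left c a) (ih (max c a))

theorem mem_le_foldl_max (l : List Int) (c : Int) : ∀ x ∈ l, x ≤ l.foldl max c := by
  induction l generalizing c with
  | nil => simp
  | cons a t ih =>
    intro x hx
    rcases List.mem_cons.1 hx with h | h
    · subst h; exact le_trans (le_max_right c x) (init_le_foldl_max t (max c x))
    · exact ih (max c a) x h

theorem foldl_min_le_init (l : List Int) (c : Int) : l.foldl min c ≤ c := by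
  induction l generalizing c with
  | nil => simp
  | cons a t ih => exact le_trans (ih (min c a)) (min_le_left c a)

theorem foldl_min_le_mem (l : List Int) (c : Int) : ∀ x ∈ l, l.foldl min c ≤ x := by
  induction l generalizing c with
  | nil => simp
  | cons a t ih =>
    intro x hx
    rcases List.mem_cons.1 hx with h | h
    · subst h; exact le_trans (foldl_min_le_init t (min c x)) (min_le_right c x)
    · exact ih (min c a) x h

-- the loop invariant: A's four tracked variables are exactly B's four reductions of the prefix
theorem md_fold (p : List Int) :
    p.foldl mdStep (-1000000, -1000000, 1000000, 1000000) =
      (p.foldl max (-1000000),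
       (p.filter (fun x => x ≠ p.foldl max (-1000000))).foldl max (-1000000),
       p.foldl min 1000000,
       (p.filter (fun x => x ≠ p.foldl min 1000000)).foldl min 1000000) := by
  induction p using List.reverseRecOn with
  | nil => simp [mdStep]
  | append_singleton l x ih =>
    have hM : (l ++ [x]).foldl max (-1000000) = max (l.foldl max (-1000000)) x := by
      simp [List.foldl_append]
    have hm : (l ++ [x]).foldl min 1000000 = min (l.foldl min 1000000) x := by
      simp [List.foldl_append]
    set M := l.foldl max (-1000000) with hMdef
    set m := l.foldl min 1000000 with hmdef
    clear_value M m
    have hL : (l ++ [x]).foldl mdStep (-1000000, -1000000, 1000000, 1000000)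
        = mdStep (M,
            (l.filter (fun y => y ≠ M)).foldl max (-1000000),
            m,
            (l.filter (fun y => y ≠ m)).foldl min 1000000) x := by
      simp [List.foldl_append, ih]
    rw [hL, hM, hm]
    -- high side components
    have highComp :
        (mdStep (M, (l.filter (fun y => y ≠ M)).foldl max (-1000000),
                 m, (l.filter (fun y => y ≠ m)).foldl min 1000000) x).1 = max M x ∧
        (mdStep (M, (l.filter (fun y => y ≠ M)).foldl max (-1000000),
                 m, (l.filter (fun y => y ≠ m)).foldl min 1000000) x).2.1 =
          ((l ++ [x]).filter (fun y => y ≠ max M x)).foldl max (-1000000) := by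
      rcases lt_or_ge M x with hgt | hle
      · -- x strictly bigger than everything seen: new second_high is old M
        have hmax : max M x = x := max_eq_right (le_of_lt hgt)
        have hfilt : (l ++ [x]).filter (fun y => y ≠ x) = l := by
          rw [List.filter_append]
          have h1 : l.filter (fun y => y ≠ x) = l := by
            apply List.filter_eq_self.2
            intro a ha
            have hb := mem_le_foldl_max l (-1000000) a ha
            rw [← hMdef] at hb
            simp only [ne_eq, decide_eq_true_eq]
            omega
          rw [h1]
          simp
        constructor
        · simp [mdStep, hgt, hmax]
        · rw [hmax, hfilt]
          simp [mdStep, hgt, ← hMdef]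
      · -- x ≤ M: highest unchanged
        have hmax : max M x = M := max_eq_left hle
        have hnotgt : ¬ (x > M) := not_lt.2 hle
        by_cases hx : x = M
        · -- duplicate of the maximum: filtered out, second_high unchanged
          have hfilt : (l ++ [x]).filter (fun y => y ≠ M) = l.filter (fun y => y ≠ M) := by
            rw [List.filter_append]; simp [hx]
          rw [hmax, hfilt]
          constructor
          · simp [mdStep, hnotgt]
          · simp [mdStep, hnotgt, hx]
        · -- x below the maximum: second_high becomes max of itself and x
          have hfilt : (l ++ [x]).filter (fun y => y ≠ M) = l.filter (fun y => y ≠ M) ++ [x] := by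
            rw [List.filter_append]; simp [hx]
          rw [hmax, hfilt]
          constructor
          · simp [mdStep, hnotgt]
          · rw [List.foldl_append]
            simp only [List.foldl]
            set S := (l.filter (fun y => y ≠ M)).foldl max (-1000000) with hS
            rcases lt_or_ge S x with h1 | h1
            · simp [mdStep, hnotgt, h1, hx, max_eq_right (le_of_lt h1)]
            · have : ¬ (x > S) := not_lt.2 h1
              simp [mdStep, hnotgt, this, hx, max_eq_left h1]
    have lowComp :
        (mdStep (M, (l.filter (fun y => y ≠ M)).foldl max (-1000000),
                 m, (l.filter (fun y => y ≠ m)).foldl min 1000000) x).2.2.1 = min m x ∧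
        (mdStep (M, (l.filter (fun y => y ≠ M)).foldl max (-1000000),
                 m, (l.filter (fun y => y ≠ m)).foldl min 1000000) x).2.2.2 =
          ((l ++ [x]).filter (fun y => y ≠ min m x)).foldl min 1000000 := by
      rcases lt_or_ge x m with hlt | hle
      · have hmin : min m x = x := min_eq_right (le_of_lt hlt)
        have hfilt : (l ++ [x]).filter (fun y => y ≠ x) = l := by
          rw [List.filter_append]
          have h1 : l.filter (fun y => y ≠ x) = l := by
            apply List.filter_eq_self.2
            intro a ha
            have hb := foldl_min_le_mem l 1000000 a ha
            rw [← hmdef] at hb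
            simp only [ne_eq, decide_eq_true_eq]
            omega
          rw [h1]
          simp
        constructor
        · simp [mdStep, hlt, hmin]
        · rw [hmin, hfilt]
          simp [mdStep, hlt, ← hmdef]
      · have hmin : min m x = m := min_eq_left hle
        have hnotlt : ¬ (x < m) := not_lt.2 hle
        by_cases hx : x = m
        · have hfilt : (l ++ [x]).filter (fun y => y ≠ m) = l.filter (fun y => y ≠ m) := by
            rw [List.filter_append]; simp [hx]
          rw [hmin, hfilt]
          constructor
          · simp [mdStep, hnotlt]
          · simp [mdStep, hnotlt, hx]
        · have hfilt : (l ++ [x]).filter (fun y => y ≠ m) = l.filter (fun y => y ≠ m) ++ [x] := by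
            rw [List.filter_append]; simp [hx]
          rw [hmin, hfilt]
          constructor
          · simp [mdStep, hnotlt]
          · rw [List.foldl_append]
            simp only [List.foldl]
            set S := (l.filter (fun y => y ≠ m)).foldl min 1000000 with hS
            rcases lt_or_ge x S with h1 | h1
            · simp [mdStep, hnotlt, h1, hx, min_eq_right (le_of_lt h1)]
            · have : ¬ (x < S) := not_lt.2 h1
              simp [mdStep, hnotlt, this, hx, min_eq_left h1]
    exact Prod.ext highComp.1 (Prod.ext highComp.2 (Prod.ext lowComp.1 lowComp.2))

-- ===== VERDICT (by name: the statement is the Claim_ definition above) =====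
theorem max_diff_btw_groups_of_size_two_spec : Claim_equal_max_diff_btw_groups_of_size_two := by
  intro arr _
  unfold Spec_max_diff_btw_groups_of_size_two
  unfold max_diff_btw_groups_of_size_two max_diff_btw_groups_of_size_two_alt
  rw [md_fold]
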